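-- pv_equiv track=rewrite | github.com/QuangPhung15/CompetitiveProgramming | codeforce/Python/800/Cards for Friends.py | solve
-- ===== SOURCE A (Python) =====
-- def solve(w, h, n):
-- 	count = 1
--
-- 	while (w % 2 == 0 or h % 2 == 0):
-- 		if (w % 2 == 0):
-- 			count *= 2
-- 			w //= 2
--
-- 		if (h % 2 == 0):
-- 			count *= 2
-- 			h //= 2
--
-- 	if (count >= n):
-- 		return "YES"
--
-- 	return "NO"
-- ===== SOURCE B (Python) =====
-- def solve(w, h, n):
--     # count after A's loop is 2**(v2(w)+v2(h)); for any nonzero int x, x & -x == 2**v2(x)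
--     return "YES" if (w & -w) * (h & -h) >= n else "NO"
-- ===== Notes on version B (the rewrite author's own statement) =====
-- stated objective: simpler
-- what changed: Replaces the while-loop factor-of-2 extraction with the closed-form lowest-set-bit identity (w & -w) * (h & -h), which equals A's count directly.
import Mathlib
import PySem

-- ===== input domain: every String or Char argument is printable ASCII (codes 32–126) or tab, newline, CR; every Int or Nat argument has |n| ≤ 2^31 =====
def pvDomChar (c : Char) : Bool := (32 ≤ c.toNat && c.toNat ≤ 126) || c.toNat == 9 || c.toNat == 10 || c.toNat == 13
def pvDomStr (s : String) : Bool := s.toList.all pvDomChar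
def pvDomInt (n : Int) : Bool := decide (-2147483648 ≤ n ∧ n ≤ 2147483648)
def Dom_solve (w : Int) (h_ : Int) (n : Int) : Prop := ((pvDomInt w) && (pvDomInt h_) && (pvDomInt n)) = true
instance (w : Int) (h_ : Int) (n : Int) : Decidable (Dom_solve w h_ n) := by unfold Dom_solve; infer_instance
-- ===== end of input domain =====

-- B replaces A's while-loop factor-of-2 extraction by the closed-form lowest-set-bit
-- identity (w & -w) * (h & -h) = A's count (objective: simpler).

-- ===== PORT A =====

-- measure lemma used by solveLoop's termination proof
theorem pvHalveLt (w : Int) (hw : w ≠ 0) (he : PySem.Int.mod w 2 = 0) :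
    (PySem.Int.floordiv w 2).natAbs < w.natAbs := by
  rcases (PySem.Int.mod_eq_zero_iff_dvd w 2).mp he with ⟨k, hk⟩
  subst hk
  rw [PySem.Int.floordiv_eq_ediv_of_pos (by norm_num : (0:Int) < 2),
      Int.mul_ediv_cancel_left _ (by norm_num)]
  omega

-- the while-loop of A; the `w = 0 ∨ h_ = 0` guard only makes the function total
-- (Python A never returns there: the loop runs forever), it is outside Pre_solve
def solveLoop (count : Int) (w : Int) (h_ : Int) : Int :=
  if hz : w = 0 ∨ h_ = 0 then count
  else if hc : PySem.Int.mod w 2 = 0 ∨ PySem.Int.mod h_ 2 = 0 then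
    -- the two sequential `if`s of the loop body, applied to (count, w) then (count, h)
    solveLoop
      (if PySem.Int.mod h_ 2 = 0
        then (if PySem.Int.mod w 2 = 0 then count * 2 else count) * 2
        else (if PySem.Int.mod w 2 = 0 then count * 2 else count))
      (if PySem.Int.mod w 2 = 0 then PySem.Int.floordiv w 2 else w)
      (if PySem.Int.mod h_ 2 = 0 then PySem.Int.floordiv h_ 2 else h_)
  else count
  termination_by (w.natAbs + h_.natAbs)
  decreasing_by
    split_ifs with hw hh hh2
    · exact Nat.add_lt_add_of_lt_of_le (pvHalveLt w (by tauto) hw)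
        (Nat.le_of_lt (pvHalveLt h_ (by tauto) hh))
    · exact Nat.add_lt_add_of_lt_of_le (pvHalveLt w (by tauto) hw) (Nat.le_refl _)
    · exact Nat.add_lt_add_left (pvHalveLt h_ (by tauto) hh2) _
    · exact absurd hc (by tauto)

def solve (w : Int) (h_ : Int) (n : Int) : String :=
  if solveLoop 1 w h_ ≥ n then "YES" else "NO"

-- ===== PORT B =====
def solve_alt (w : Int) (h_ : Int) (n : Int) : String :=
  if PySem.Int.band w (-w) * PySem.Int.band h_ (-h_) ≥ n then "YES" else "NO"

-- ===== PRECONDITION & SPEC =====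
-- Pre_ excludes w = 0 or h_ = 0: there Python A's while-loop never terminates (no value is returned).
def Pre_solve (w : Int) (h_ : Int) (n : Int) : Prop := w ≠ 0 ∧ h_ ≠ 0
instance (w : Int) (h_ : Int) (n : Int) : Decidable (Pre_solve w h_ n) := by
  unfold Pre_solve; infer_instance

def pvWitness_solve : Int × Int × Int := (12, 6, 8)

def Spec_solve (w : Int) (h_ : Int) (n : Int) (out : String) : Prop := out = solve_alt w h_ n
instance (w : Int) (h_ : Int) (n : Int) (out : String) : Decidable (Spec_solve w h_ n out) := by
  unfold Spec_solve; infer_instance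

-- ===== CLAIM (what is proved, stated in full; the proofs are below) =====
def Claim_equal_solve : Prop :=
  ∀ (w : Int) (h_ : Int) (n : Int), Dom_solve w h_ n → Pre_solve w h_ n → Spec_solve w h_ n (solve w h_ n)

-- ===== LEMMAS AND PROOFS =====

-- n odd: n &&& (n-1) = n - 1
theorem pvNatAndPredOdd (n : Nat) (h : n % 2 = 1) : n &&& (n - 1) = n - 1 := by
  apply Nat.eq_of_testBit_eq
  intro i
  cases i with
  | zero => simp [Nat.testBit_zero]; omega
  | succ i =>
      rw [Nat.testBit_and, Nat.testBit_succ, Nat.testBit_succ]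
      have : (n - 1) / 2 = n / 2 := by omega
      rw [this, Bool.and_self]

-- n even, 0 < n: n &&& (n-1) = 2 * ((n/2) &&& (n/2 - 1))
theorem pvNatAndPredEven (n : Nat) (h : n % 2 = 0) (hn : 0 < n) :
    n &&& (n - 1) = 2 * ((n / 2) &&& (n / 2 - 1)) := by
  apply Nat.eq_of_testBit_eq
  intro i
  cases i with
  | zero =>
      simp [Nat.testBit_zero]
      omega
  | succ i =>
      rw [Nat.testBit_and, Nat.testBit_succ, Nat.testBit_succ, Nat.testBit_succ]
      have h1 : (n - 1) / 2 = n / 2 - 1 := by omega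
      have h2 : 2 * (n / 2 &&& n / 2 - 1) / 2 = n / 2 &&& n / 2 - 1 := by omega
      rw [h1, h2, Nat.testBit_and]

-- lowest set bit at the Nat level
theorem pvNatLowbitOdd (n : Nat) (h : n % 2 = 1) : n - (n &&& (n - 1)) = 1 := by
  rw [pvNatAndPredOdd n h]; omega

theorem pvNatLowbitEven (n : Nat) (h : n % 2 = 0) (hn : 0 < n) :
    n - (n &&& (n - 1)) = 2 * (n / 2 - ((n / 2) &&& (n / 2 - 1))) := by
  rw [pvNatAndPredEven n h hn]
  have := Nat.and_le_left (n := n / 2) (m := n / 2 - 1)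
  omega

-- band w (-w) rewritten through the Nat-level lowbit, both signs
theorem pvBandNegEq (w : Int) (hw : w ≠ 0) :
    PySem.Int.band w (-w) = ((w.natAbs - (w.natAbs &&& (w.natAbs - 1)) : Nat) : Int) := by
  unfold PySem.Int.band
  rcases lt_or_gt_of_ne hw with hneg | hpos
  · rw [if_neg (by omega), if_pos (by omega)]
    have h1 : (-w).toNat = w.natAbs := by omega
    have h2 : (-w - 1).toNat = w.natAbs - 1 := by omega
    rw [h1, h2]
  · rw [if_pos (by omega), if_neg (by omega)]
    have h1 : w.toNat = w.natAbs := by omega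
    have h2 : (- -w - 1).toNat = w.natAbs - 1 := by omega
    rw [h1, h2]

theorem pvBandOdd (w : Int) (h : PySem.Int.mod w 2 = 1) : PySem.Int.band w (-w) = 1 := by
  have hw : w ≠ 0 := by rintro rfl; simp [PySem.Int.mod] at h
  have hodd : w.natAbs % 2 = 1 := by
    rcases Int.even_or_odd w with he | ho
    · exfalso
      rcases he with ⟨k, hk⟩
      have : PySem.Int.mod w 2 = 0 := (PySem.Int.mod_eq_zero_iff_dvd w 2).mpr ⟨k, by omega⟩
      omega
    · rcases ho with ⟨k, hk⟩; omega
  rw [pvBandNegEq w hw, pvNatLowbitOdd _ hodd]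
  rfl

theorem pvBandEven (w : Int) (hw : w ≠ 0) (h : PySem.Int.mod w 2 = 0) :
    PySem.Int.band w (-w)
      = 2 * PySem.Int.band (PySem.Int.floordiv w 2) (-(PySem.Int.floordiv w 2)) := by
  rcases (PySem.Int.mod_eq_zero_iff_dvd w 2).mp h with ⟨k, hk⟩
  subst hk
  have hk0 : k ≠ 0 := by rintro rfl; simp at hw
  have hfd : PySem.Int.floordiv (2 * k) 2 = k := by
    rw [PySem.Int.floordiv_eq_ediv_of_pos (by norm_num : (0:Int) < 2),
        Int.mul_ediv_cancel_left _ (by norm_num)]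
  rw [hfd, pvBandNegEq _ hw, pvBandNegEq _ hk0]
  have habs : (2 * k).natAbs = 2 * k.natAbs := by simp [Int.natAbs_mul]
  rw [habs, pvNatLowbitEven (2 * k.natAbs) (by omega) (by omega)]
  have : 2 * k.natAbs / 2 = k.natAbs := by omega
  rw [this]
  push_cast
  ring

-- mod 2 is 0 or 1, convenient form
theorem pvMod2 (w : Int) : PySem.Int.mod w 2 = 0 ∨ PySem.Int.mod w 2 = 1 :=
  PySem.Int.mod_two_eq w

theorem pvHalveNe (w : Int) (hw : w ≠ 0) (h : PySem.Int.mod w 2 = 0) :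
    PySem.Int.floordiv w 2 ≠ 0 := by
  rcases (PySem.Int.mod_eq_zero_iff_dvd w 2).mp h with ⟨k, hk⟩
  subst hk
  rw [PySem.Int.floordiv_eq_ediv_of_pos (by norm_num : (0:Int) < 2),
      Int.mul_ediv_cancel_left _ (by norm_num)]
  intro hk0; exact hw (by rw [hk0, mul_zero])

-- the loop computes count * lowbit(w) * lowbit(h)
theorem pvLoopEq : ∀ (N : Nat) (w h_ c : Int), w.natAbs + h_.natAbs ≤ N →
    w ≠ 0 → h_ ≠ 0 →
    solveLoop c w h_ = c * (PySem.Int.band w (-w) * PySem.Int.band h_ (-h_)) := by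
  intro N
  induction N with
  | zero => intro w h_ c hN hw hh; omega
  | succ N ih =>
      intro w h_ c hN hw hh
      unfold solveLoop
      rw [dif_neg (by tauto : ¬(w = 0 ∨ h_ = 0))]
      by_cases hwe : PySem.Int.mod w 2 = 0 <;> by_cases hhe : PySem.Int.mod h_ 2 = 0
      · rw [dif_pos (Or.inl hwe)]
        simp only [if_pos hwe, if_pos hhe]
        rw [ih _ _ _ (by have := pvHalveLt w hw hwe; have := pvHalveLt h_ hh hhe; omega)
              (pvHalveNe w hw hwe) (pvHalveNe h_ hh hhe)]
        rw [pvBandEven w hw hwe, pvBandEven h_ hh hhe]; ring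
      · rw [dif_pos (Or.inl hwe)]
        simp only [if_pos hwe, if_neg hhe]
        rw [ih _ _ _ (by have := pvHalveLt w hw hwe; omega) (pvHalveNe w hw hwe) hh]
        rw [pvBandEven w hw hwe]; ring
      · rw [dif_pos (Or.inr hhe)]
        simp only [if_neg hwe, if_pos hhe]
        rw [ih _ _ _ (by have := pvHalveLt h_ hh hhe; omega) hw (pvHalveNe h_ hh hhe)]
        rw [pvBandEven h_ hh hhe]; ring
      · rw [dif_neg (by tauto)]
        rw [pvBandOdd w (by rcases pvMod2 w with h | h <;> [exact absurd h hwe; exact h]),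
            pvBandOdd h_ (by rcases pvMod2 h_ with h | h <;> [exact absurd h hhe; exact h])]
        ring

-- ===== VERDICT (by name: the statement is the Claim_ definition above) =====
theorem solve_spec : Claim_equal_solve := by
  intro w h_ n _ hpre
  unfold Spec_solve solve solve_alt
  rw [pvLoopEq (w.natAbs + h_.natAbs) w h_ 1 (le_refl _) hpre.1 hpre.2, one_mul]
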